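-- pv_equiv track=rewrite | github.com/ajudson23/DES-FiniteCalculator | question5/finiteFieldCalc_judson.py | find_multiplicative_inverse_GF28
-- ===== SOURCE A (Python) =====
-- def find_multiplicative_inverse_GF28(a):
--     r = a
--     previousR = 0x11B # P(x) = x^8 + x^4 + x^3 + x + 1
--     t, previousT = 0, 1
--     # Extended Euclidean:
--     while previousR != 0:
--         quotient = r // previousR
--         r, previousR = previousR, r - quotient * previousR
--         t, previousT = previousT, t - quotient * previousT
--     # if r is greater than 1 then 'a' is not invertible in GF(2^8)
--     if r > 1:
--         raise ValueError("Element is not invertible in GF(2^8).")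
--     # check if less than 0, add 256 if negative
--     if previousT < 0:
--         previousT += 256
--     return format(previousT, '08b')
-- ===== SOURCE B (Python) =====
-- def find_multiplicative_inverse_GF28(a):
--     # Two-stage continued-fraction decomposition: first a plain Euclid pass
--     # collecting the quotient sequence, then backward substitution over the
--     # reversed quotients to recover the Bezout coefficient of a.
--     quotients = []
--     x, y = a, 0x11B
--     while y != 0:
--         quotients.append(x // y)
--         x, y = y, x % y
--     if x > 1:
--         raise ValueError("Element is not invertible in GF(2^8).")
--     u, v = 0, 1
--     for q in reversed(quotients):
--         u, v = v, u - q * v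
--     if v < 0:
--         v += 256
--     return format(v, '08b')
-- ===== Notes on version B (the rewrite author's own statement) =====
-- stated objective: alternative
-- what changed: Replaces A's single four-variable extended-Euclidean loop by two staged passes: a plain Euclid pass that only collects the quotient sequence (continued-fraction expansion), then a backward-substitution fold over the reversed quotients that reconstructs the Bezout coefficient; the invertibility check, +256 normalisation and '08b' formatting are unchanged.
import Mathlib
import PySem

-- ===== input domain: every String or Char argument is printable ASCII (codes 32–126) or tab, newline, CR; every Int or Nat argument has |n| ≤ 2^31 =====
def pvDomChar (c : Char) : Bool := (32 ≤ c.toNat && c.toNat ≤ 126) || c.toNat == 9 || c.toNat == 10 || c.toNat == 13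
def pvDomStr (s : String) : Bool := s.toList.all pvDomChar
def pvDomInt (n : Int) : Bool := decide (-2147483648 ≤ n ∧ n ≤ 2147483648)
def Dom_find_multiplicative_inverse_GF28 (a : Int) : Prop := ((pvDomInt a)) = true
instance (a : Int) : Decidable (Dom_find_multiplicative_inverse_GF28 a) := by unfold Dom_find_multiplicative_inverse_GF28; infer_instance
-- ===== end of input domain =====

-- B replaces A's single four-variable extended-Euclidean loop by two staged passes:
-- a plain Euclid pass collecting the quotient sequence, then a backward-substitution
-- fold over the reversed quotients reconstructing the Bezout coefficient (same cost).

-- format(n, '08b'): binary digits zero-padded to width 8, the sign counting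
-- toward the width (Python-exact; digits via PySem.Int.toBinChars = format(n,'b')).
def fmt08b (n : Int) : String :=
  if n < 0 then
    let ds := PySem.Int.toBinChars (-n)
    String.ofList ('-' :: (List.replicate (7 - ds.length) '0' ++ ds))
  else
    let ds := PySem.Int.toBinChars n
    String.ofList (List.replicate (8 - ds.length) '0' ++ ds)

-- ===== PORT A =====
-- A's while-loop; terminates since |r - (r//pR)*pR| = |r % pR| < |pR| when pR ≠ 0.
def loopA (r pR t pT : Int) : Int × Int :=
  if h : pR = 0 then (r, pT)
  else
    let quotient := PySem.Int.floordiv r pR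
    loopA pR (r - quotient * pR) pT (t - quotient * pT)
termination_by pR.natAbs
decreasing_by
  have hid := PySem.Int.floordiv_mul_add_mod r pR
  rcases lt_or_gt_of_ne h with hn | hp
  · have h1 := PySem.Int.mod_neg_bounds (a := r) hn; omega
  · have h1 := PySem.Int.mod_nonneg (a := r) hp
    have h2 := PySem.Int.mod_lt (a := r) hp; omega

def find_multiplicative_inverse_GF28 (a : Int) : String :=
  let res := loopA a 0x11B 0 1
  if res.1 > 1 then ""  -- raise ValueError: excluded by Pre_
  else
    let pT := if res.2 < 0 then res.2 + 256 else res.2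
    fmt08b pT

-- ===== PORT B =====
-- stage 1 of Source B: the plain-Euclid while-loop that appends x // y and steps to
-- (y, x % y); as a structural recursion it conses the quotient and carries the gcd.
def quotsB (x y : Int) : List Int × Int :=
  if h : y = 0 then ([], x)
  else
    let rest := quotsB y (PySem.Int.mod x y)
    (PySem.Int.floordiv x y :: rest.1, rest.2)
termination_by y.natAbs
decreasing_by
  rcases lt_or_gt_of_ne h with hn | hp
  · have h1 := PySem.Int.mod_neg_bounds (a := x) hn; omega
  · have h1 := PySem.Int.mod_nonneg (a := x) hp
    have h2 := PySem.Int.mod_lt (a := x) hp; omega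

-- stage 2 of Source B: 'for q in reversed(quotients): u, v = v, u - q * v' from (0, 1)
-- is exactly a right fold of that step over the quotient list.
def backSubst (qs : List Int) : Int × Int :=
  qs.foldr (fun q p => (p.2, p.1 - q * p.2)) ((0 : Int), (1 : Int))

def find_multiplicative_inverse_GF28_alt (a : Int) : String :=
  let st := quotsB a 0x11B
  if st.2 > 1 then ""  -- raise ValueError: excluded by Pre_
  else
    let uv := backSubst st.1
    let v := if uv.2 < 0 then uv.2 + 256 else uv.2
    fmt08b v

-- ===== PRECONDITION & SPEC =====
-- Pre_ excludes exactly the multiples of 283 (= 0x11B), on which both Pythons raise ValueError.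
def Pre_find_multiplicative_inverse_GF28 (a : Int) : Prop := PySem.Int.mod a 0x11B ≠ 0
instance (a : Int) : Decidable (Pre_find_multiplicative_inverse_GF28 a) := by unfold Pre_find_multiplicative_inverse_GF28; infer_instance
def pvWitness_find_multiplicative_inverse_GF28 : Int := (7)

def Spec_find_multiplicative_inverse_GF28 (a : Int) (out : String) : Prop := out = find_multiplicative_inverse_GF28_alt a
instance (a : Int) (out : String) : Decidable (Spec_find_multiplicative_inverse_GF28 a out) := by unfold Spec_find_multiplicative_inverse_GF28; infer_instance

-- ===== CLAIM (what is proved, stated in full; the proofs are below) =====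
def Claim_equal_find_multiplicative_inverse_GF28 : Prop := ∀ (a : Int), Dom_find_multiplicative_inverse_GF28 a → Pre_find_multiplicative_inverse_GF28 a → Spec_find_multiplicative_inverse_GF28 a (find_multiplicative_inverse_GF28 a)

-- ===== LEMMAS AND PROOFS =====

-- A's combined loop equals B's two stages: its gcd is quotsB's gcd, and its final
-- coefficient is the backward substitution applied linearly to the current (t, pT).
theorem loopA_eq_stages (r pR t pT : Int) :
    loopA r pR t pT =
      ((quotsB r pR).2,
       (backSubst (quotsB r pR).1).1 * t + (backSubst (quotsB r pR).1).2 * pT) := by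
  induction r, pR, t, pT using loopA.induct with
  | case1 r t pT =>
    rw [loopA, quotsB]; simp [backSubst]
  | case2 r pR t pT h q ih =>
    have hq : q = PySem.Int.floordiv r pR := rfl
    rw [hq] at ih
    have hid := PySem.Int.floordiv_mul_add_mod r pR
    have hm : r - PySem.Int.floordiv r pR * pR = PySem.Int.mod r pR := by linarith
    rw [loopA, quotsB]
    simp only [dif_neg h]
    rw [hm] at ih ⊢
    rw [ih]
    simp only [backSubst, List.foldr_cons, Prod.mk.injEq]
    exact ⟨by trivial, by ring⟩

theorem find_multiplicative_inverse_GF28_spec : Claim_equal_find_multiplicative_inverse_GF28 := by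
  intro a _ _
  unfold Spec_find_multiplicative_inverse_GF28
  unfold find_multiplicative_inverse_GF28 find_multiplicative_inverse_GF28_alt
  rw [loopA_eq_stages]
  simp
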